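-- pv_equiv track=rewrite | github.com/yoav-klein/python | basics/infinity_exercises/basics.py | flip_number
-- ===== SOURCE A (Python) =====
-- def flip_number(num):
--     """Write a function that receives an integer and flips it
--        1234 -> 4321
--     """
--     if(type(num) == str):
--         num = int(num)
--     sum = 0
--     count = 0
--     while num > 0:
--         count += 1
--         sum = sum * 10
--         current = num % 10
--         sum += current
--         num = (int)(num / 10)
--
--     return sum
-- ===== SOURCE B (Python) =====
-- def flip_number(num):
--     if type(num) == str:
--         num = int(num)
--     digits = []
--     while num > 0:
--         num, d = divmod(num, 10)
--         digits.append(d)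
--     return sum(d * 10 ** i for i, d in enumerate(reversed(digits)))
-- ===== Notes on version B (the rewrite author's own statement) =====
-- stated objective: alternative
-- what changed: B replaces A's single Horner-style accumulating loop (sum = sum*10 + digit, with float-based int(num/10)) by a two-phase algorithm: collect the digits into a list with divmod, then sum digit * 10**i over the reversed list.
import Mathlib
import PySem

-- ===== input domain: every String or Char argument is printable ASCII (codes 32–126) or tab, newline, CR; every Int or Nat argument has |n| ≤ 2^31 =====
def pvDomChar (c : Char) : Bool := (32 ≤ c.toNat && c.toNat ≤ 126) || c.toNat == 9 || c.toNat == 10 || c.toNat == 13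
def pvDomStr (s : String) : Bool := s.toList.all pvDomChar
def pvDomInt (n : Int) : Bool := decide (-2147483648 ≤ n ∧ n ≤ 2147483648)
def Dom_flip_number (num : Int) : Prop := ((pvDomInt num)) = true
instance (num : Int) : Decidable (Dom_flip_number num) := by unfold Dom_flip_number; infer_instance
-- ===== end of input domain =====

-- B reverses the digits in two phases (extract digit list, then positional sum) instead of
-- A's single Horner accumulation; same cost, different decomposition (objective: alternative).
-- (The Python `type(num) == str` coercion branch is outside the Int signature and is not ported.)

-- ===== PORT A =====
-- the while loop of A: state (num, sum, count); `int(num / 10)` is truncating division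
-- (exact on the domain |num| ≤ 2^31 < 2^53, ported as PySem.Int.truncdiv)
def flipA_go (num sum count : Int) : Int :=
  if _h : num > 0 then
    flipA_go (PySem.Int.truncdiv num 10) (sum * 10 + PySem.Int.mod num 10) (count + 1)
  else sum
termination_by num.toNat
decreasing_by
  have ht : num.tdiv 10 = num / 10 := Int.tdiv_eq_ediv_of_nonneg (by omega)
  simp only [PySem.Int.truncdiv, ht]
  omega

def flip_number (num : Int) : Int := flipA_go num 0 0

-- ===== PORT B =====
-- B's digit-collecting while loop: divmod(num, 10) = (floordiv, mod); appends num % 10 each round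
def flipB_digits (num : Int) (acc : List Int) : List Int :=
  if _h : num > 0 then
    flipB_digits (PySem.Int.floordiv num 10) (acc ++ [PySem.Int.mod num 10])
  else acc
termination_by num.toNat
decreasing_by
  have hf : num.fdiv 10 = num / 10 := by rw [Int.fdiv_eq_ediv]; simp
  simp only [PySem.Int.floordiv, hf]
  omega

-- sum(d * 10 ** i for i, d in enumerate(reversed(digits))); enumerate indices start at 0,
-- so Python's 10 ** i is ported exactly as 10 ^ i.toNat
def flip_number_alt (num : Int) : Int :=
  let digits := flipB_digits num []
  ((PySem.List.enumerate digits.reverse 0).map (fun p => p.2 * 10 ^ p.1.toNat)).sum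

-- ===== PRECONDITION & SPEC =====
def Spec_flip_number (num : Int) (out : Int) : Prop := out = flip_number_alt num
instance (num : Int) (out : Int) : Decidable (Spec_flip_number num out) := by unfold Spec_flip_number; infer_instance

-- ===== CLAIM (what is proved, stated in full; the proofs are below) =====
def Claim_equal_flip_number : Prop := ∀ (num : Int), Dom_flip_number num → Spec_flip_number num (flip_number num)

-- ===== LEMMAS AND PROOFS =====

-- the positional value B computes from a LSB-first digit list
def pvVal (l : List Int) : Int :=
  ((PySem.List.enumerate l.reverse 0).map (fun p => p.2 * 10 ^ p.1.toNat)).sum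

lemma flipB_digits_append (num : Int) (acc : List Int) :
    flipB_digits num acc = acc ++ flipB_digits num [] := by
  by_cases h : num > 0
  · rw [flipB_digits, dif_pos h]
    conv_rhs => rw [flipB_digits, dif_pos h]
    rw [flipB_digits_append (PySem.Int.floordiv num 10) (acc ++ [PySem.Int.mod num 10]),
      flipB_digits_append (PySem.Int.floordiv num 10) ([] ++ [PySem.Int.mod num 10])]
    simp
  · rw [flipB_digits, dif_neg h]
    conv_rhs => rw [flipB_digits, dif_neg h]
    simp
termination_by num.toNat
decreasing_by all_goals
  (have hf : num.fdiv 10 = num / 10 := by rw [Int.fdiv_eq_ediv]; simp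
   simp only [PySem.Int.floordiv, hf]
   omega)

lemma pvVal_cons (d : Int) (l : List Int) :
    pvVal (d :: l) = pvVal l + d * 10 ^ l.length := by
  simp [pvVal, PySem.List.enumerate_append, PySem.List.enumerate]

lemma flipA_go_eq (num sum count : Int) :
    flipA_go num sum count
      = sum * 10 ^ (flipB_digits num []).length + pvVal (flipB_digits num []) := by
  fun_induction flipA_go num sum count with
  | case1 num sum count h ih =>
    have hdig : flipB_digits num []
        = PySem.Int.mod num 10 :: flipB_digits (PySem.Int.floordiv num 10) [] := by
      rw [flipB_digits, dif_pos h, flipB_digits_append]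
      simp
    have htd : PySem.Int.truncdiv num 10 = PySem.Int.floordiv num 10 := by
      rw [PySem.Int.truncdiv, PySem.Int.floordiv, Int.tdiv_eq_ediv_of_nonneg (by omega),
        Int.fdiv_eq_ediv]
      simp
    rw [ih, htd, hdig, pvVal_cons]
    simp [pow_succ]
    ring
  | case2 num sum count h =>
    rw [flipB_digits, dif_neg h]
    simp [pvVal]

-- ===== VERDICT (by name: the statement is the Claim_ definition above) =====
theorem flip_number_spec : Claim_equal_flip_number := by
  intro num _
  show flip_number num = flip_number_alt num
  rw [flip_number, flipA_go_eq]
  simp [flip_number_alt, pvVal]
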